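-- pv_equiv track=rewrite | github.com/Ushapithani/DSA_revise | string/rev.py | min_deletions_to_make_equal
-- ===== SOURCE A (Python) =====
-- def min_deletions_to_make_equal(str1, str2):
--     from collections import Counter
--
--     count1 = Counter(str1)
--     count2 = Counter(str2)
--
--     deletions = 0
--
--     for char in set(str1 + str2):
--         deletions += abs(count1[char] - count2[char])
--
--     return deletions
-- ===== SOURCE B (Python) =====
-- def min_deletions_to_make_equal(str1, str2):
--     s1 = sorted(str1)
--     s2 = sorted(str2)
--     i = j = matches = 0
--     while i < len(s1) and j < len(s2):
--         if s1[i] == s2[j]: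
--             matches += 1
--             i += 1
--             j += 1
--         elif s1[i] < s2[j]:
--             i += 1
--         else:
--             j += 1
--     return len(str1) + len(str2) - 2 * matches
-- ===== Notes on version B (the rewrite author's own statement) =====
-- stated objective: alternative
-- what changed: B drops Counters entirely: it sorts both strings and runs a two-pointer merge over the sorted lists counting matched characters (the size of the common multiset), returning len(str1)+len(str2)-2*matches, instead of A's hash-count pass summing per-character absolute count differences over the union of characters.
import Mathlib
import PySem

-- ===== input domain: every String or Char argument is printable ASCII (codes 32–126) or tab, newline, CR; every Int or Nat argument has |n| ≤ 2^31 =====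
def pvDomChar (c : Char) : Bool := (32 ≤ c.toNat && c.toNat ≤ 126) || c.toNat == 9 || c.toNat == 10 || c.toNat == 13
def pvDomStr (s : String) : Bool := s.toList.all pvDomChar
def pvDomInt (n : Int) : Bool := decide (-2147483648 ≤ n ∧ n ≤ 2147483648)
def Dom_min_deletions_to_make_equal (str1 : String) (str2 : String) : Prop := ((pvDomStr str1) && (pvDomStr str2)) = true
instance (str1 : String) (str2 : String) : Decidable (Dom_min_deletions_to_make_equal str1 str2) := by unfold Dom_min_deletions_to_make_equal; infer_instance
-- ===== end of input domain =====

-- B replaces A's Counter pass (summing per-character absolute count differences over the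
-- union of characters) by sorting both strings and counting matched characters with a
-- two-pointer merge, returning len1+len2-2*matches (objective: alternative algorithm).

-- ===== PORT A =====
def min_deletions_to_make_equal (str1 : String) (str2 : String) : Int :=
  let count1 := PySem.Dict.counter str1.toList
  let count2 := PySem.Dict.counter str2.toList
  let deletions : Int := 0
  (PySem.Set.ofList (str1.toList ++ str2.toList)).foldl
    (fun deletions c => deletions + |count1.getD c 0 - count2.getD c 0|) deletions

-- ===== PORT B =====
-- the while loop of Source B: state = (remaining suffix of s1, remaining suffix of s2, matches)
def pvMatchLoop : List Char → List Char → Int → Int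
  | [], _, m => m
  | _ :: _, [], m => m
  | a :: xs, b :: ys, m =>
    if a = b then pvMatchLoop xs ys (m + 1)
    else if a < b then pvMatchLoop xs (b :: ys) m
    else pvMatchLoop (a :: xs) ys m
termination_by xs ys _ => xs.length + ys.length

def min_deletions_to_make_equal_alt (str1 : String) (str2 : String) : Int :=
  let s1 := PySem.List.sorted str1.toList (fun x => x) false
  let s2 := PySem.List.sorted str2.toList (fun x => x) false
  let m := pvMatchLoop s1 s2 0
  (str1.toList.length : Int) + (str2.toList.length : Int) - 2 * m

-- ===== PRECONDITION & SPEC =====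
def Spec_min_deletions_to_make_equal (str1 : String) (str2 : String) (out : Int) : Prop := out = min_deletions_to_make_equal_alt str1 str2
instance (str1 : String) (str2 : String) (out : Int) : Decidable (Spec_min_deletions_to_make_equal str1 str2 out) := by unfold Spec_min_deletions_to_make_equal; infer_instance

-- ===== CLAIM (what is proved, stated in full; the proofs are below) =====
def Claim_equal_min_deletions_to_make_equal : Prop := ∀ (str1 : String) (str2 : String), Dom_min_deletions_to_make_equal str1 str2 → Spec_min_deletions_to_make_equal str1 str2 (min_deletions_to_make_equal str1 str2)

-- ===== LEMMAS AND PROOFS =====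

-- sum of a function over a Nodup list as a Finset sum
lemma sum_map_eq_finset_sum (l : List Char) (h : l.Nodup) (f : Char → Int) :
    (l.map f).sum = ∑ x ∈ l.toFinset, f x := by
  rw [List.sum_toFinset _ h]

-- summing the count of each distinct element gives the length
lemma finset_sum_count (l : List Char) (T : Finset Char) (hT : l.toFinset ⊆ T) :
    (∑ x ∈ T, (l.count x : Int)) = l.length := by
  rw [← Finset.sum_subset hT (by
    intro x _ hx
    simp only [List.mem_toFinset] at hx
    exact_mod_cast List.count_eq_zero_of_not_mem hx),
    ← Nat.cast_sum]
  exact_mod_cast congrArg (Nat.cast (R := Int)) (List.sum_toFinset_count_eq_length l)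

lemma toFinset_ofList (l : List Char) : (PySem.Set.ofList l).toFinset = l.toFinset := by
  ext x; simp [PySem.Set.mem_ofList]

-- the two-pointer merge over sorted lists computes the size of the common multiset
lemma matchLoop_inter (xs ys : List Char) (m : Int)
    (hx : xs.Pairwise (· ≤ ·)) (hy : ys.Pairwise (· ≤ ·)) :
    pvMatchLoop xs ys m = m + (((xs : Multiset Char) ∩ (ys : Multiset Char)).card : Int) := by
  induction xs generalizing ys m with
  | nil => simp [pvMatchLoop]
  | cons a xs ih =>
    induction ys generalizing m with
    | nil => simp [pvMatchLoop]
    | cons b ys ihy =>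
      rw [List.pairwise_cons] at hx hy
      by_cases hab : a = b
      · subst hab
        have hinter : ((a :: xs : List Char) : Multiset Char) ∩ ((a :: ys : List Char) : Multiset Char)
            = a ::ₘ (((xs : Multiset Char)) ∩ ((ys : Multiset Char))) := by
          ext c
          simp only [Multiset.count_inter, Multiset.count_cons, ← Multiset.cons_coe]
          split_ifs <;> omega
        rw [pvMatchLoop, if_pos rfl, ih ys (m + 1) hx.2 hy.2, hinter]
        simp; ring
      · by_cases hlt : a < b
        · have hnot : a ∉ b :: ys := by
            intro hmem
            rcases List.mem_cons.mp hmem with h | h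
            · exact hab h
            · exact absurd (hy.1 a h) (not_le.mpr hlt)
          have hinter : (((a :: xs : List Char)) : Multiset Char) ∩ ((b :: ys : List Char) : Multiset Char)
              = ((xs : Multiset Char)) ∩ (((b :: ys : List Char)) : Multiset Char) := by
            ext c
            by_cases hc : c = a
            · subst hc
              have : ((b :: ys : List Char) : Multiset Char).count c = 0 := by
                simp only [Multiset.coe_count]
                exact List.count_eq_zero_of_not_mem hnot
              simp only [Multiset.count_inter, this]
              omega
            · simp only [Multiset.count_inter, ← Multiset.cons_coe, Multiset.count_cons_of_ne hc]
          rw [pvMatchLoop, if_neg hab, if_pos hlt, hinter]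
          exact ih (b :: ys) m hx.2 (List.pairwise_cons.mpr hy)
        · have hbla : b < a := lt_of_le_of_ne (le_of_not_gt hlt) (fun h => hab h.symm)
          have hnot : b ∉ a :: xs := by
            intro hmem
            rcases List.mem_cons.mp hmem with h | h
            · exact hab h.symm
            · exact absurd (hx.1 b h) (not_le.mpr hbla)
          have hinter : (((a :: xs : List Char)) : Multiset Char) ∩ ((b :: ys : List Char) : Multiset Char)
              = (((a :: xs : List Char)) : Multiset Char) ∩ ((ys : Multiset Char)) := by
            ext c
            by_cases hc : c = b
            · subst hc
              have : ((a :: xs : List Char) : Multiset Char).count c = 0 := by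
                simp only [Multiset.coe_count]
                exact List.count_eq_zero_of_not_mem hnot
              simp only [Multiset.count_inter, this]
              omega
            · simp only [Multiset.count_inter, ← Multiset.cons_coe, Multiset.count_cons_of_ne hc]
          rw [pvMatchLoop, if_neg hab, if_neg hlt, hinter]
          exact ihy m hy.2

-- card of the multiset intersection as a Finset sum of minima over any superset of supports
lemma inter_card_sum (l1 l2 : List Char) (T : Finset Char)
    (hT1 : l1.toFinset ⊆ T) :
    ((((l1 : Multiset Char)) ∩ ((l2 : Multiset Char))).card : Int)
      = ∑ x ∈ T, min ((l1.count x : Int)) ((l2.count x : Int)) := by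
  have hsub : ((l1 : Multiset Char) ∩ (l2 : Multiset Char)).toFinset ⊆ T := by
    intro x hx
    simp only [Multiset.mem_toFinset, Multiset.mem_inter, Multiset.mem_coe] at hx
    exact hT1 (List.mem_toFinset.mpr hx.1)
  rw [← Multiset.toFinset_sum_count_eq ((l1 : Multiset Char) ∩ (l2 : Multiset Char))]
  rw [Nat.cast_sum]
  rw [Finset.sum_subset hsub]
  · refine Finset.sum_congr rfl fun x _ => ?_
    simp only [Multiset.count_inter, Multiset.coe_count]
    push_cast [Nat.cast_min]
    rfl
  · intro x _ hx
    simp only [Multiset.mem_toFinset] at hx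
    simp only [Multiset.count_eq_zero.mpr hx, Nat.cast_zero]

theorem min_deletions_key (str1 str2 : String) :
    min_deletions_to_make_equal str1 str2 = min_deletions_to_make_equal_alt str1 str2 := by
  unfold min_deletions_to_make_equal min_deletions_to_make_equal_alt
  simp only [PySem.List.foldl_add, PySem.Dict.getD_counter, zero_add]
  set l1 := str1.toList
  set l2 := str2.toList
  set T : Finset Char := (l1 ++ l2).toFinset with hTdef
  have hT1 : l1.toFinset ⊆ T := by intro x hx; simp_all [T]
  have hT2 : l2.toFinset ⊆ T := by intro x hx; simp_all [T]
  -- LHS: sum of |c1-c2| over the union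
  rw [sum_map_eq_finset_sum _ (PySem.Set.nodup_ofList _), toFinset_ofList]
  -- RHS: two-pointer matches = multiset-intersection card = sum of minima
  have hperm1 : (PySem.List.sorted l1 (fun x => x) false).Perm l1 := PySem.List.sorted_perm _ _ _
  have hperm2 : (PySem.List.sorted l2 (fun x => x) false).Perm l2 := PySem.List.sorted_perm _ _ _
  have hsorted1 : (PySem.List.sorted l1 (fun x => x) false).Pairwise (· ≤ ·) :=
    PySem.List.sorted_pairwise l1 (fun x => x) |>.imp (fun h => h)
  have hsorted2 : (PySem.List.sorted l2 (fun x => x) false).Pairwise (· ≤ ·) :=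
    PySem.List.sorted_pairwise l2 (fun x => x) |>.imp (fun h => h)
  rw [matchLoop_inter _ _ 0 hsorted1 hsorted2, zero_add]
  have hms1 : ((PySem.List.sorted l1 (fun x => x) false : List Char) : Multiset Char) = (l1 : Multiset Char) :=
    Quot.sound hperm1
  have hms2 : ((PySem.List.sorted l2 (fun x => x) false : List Char) : Multiset Char) = (l2 : Multiset Char) :=
    Quot.sound hperm2
  rw [hms1, hms2, inter_card_sum l1 l2 T hT1]
  have habs : ∀ x ∈ T, |(l1.count x : Int) - (l2.count x : Int)|
      = (l1.count x : Int) + (l2.count x : Int)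
        - 2 * min ((l1.count x : Int)) ((l2.count x : Int)) := by
    intro x _; rcases abs_cases ((l1.count x : Int) - (l2.count x : Int)) with ⟨h, _⟩ | ⟨h, _⟩ <;> omega
  rw [Finset.sum_congr rfl habs]
  rw [Finset.sum_sub_distrib, Finset.sum_add_distrib, ← Finset.mul_sum]
  rw [finset_sum_count l1 T hT1, finset_sum_count l2 T hT2]

-- ===== VERDICT (by name: the statement is the Claim_ definition above) =====
theorem min_deletions_to_make_equal_spec : Claim_equal_min_deletions_to_make_equal := by
  intro str1 str2 _
  exact min_deletions_key str1 str2
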